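-- pv_equiv track=rewrite | github.com/heiyi42/AgenticRAG | utils/generate_tutoring_question_bank.py | page_faults
-- ===== SOURCE A (Python) =====
-- def page_faults(seq: list[int], frames: int, algorithm: str) -> int:
--     memory: list[int] = []
--     fifo_queue: list[int] = []
--     last_used: dict[int, int] = {}
--     faults = 0
--     for t, page in enumerate(seq):
--         if page in memory:
--             last_used[page] = t
--             continue
--         faults += 1
--         if len(memory) < frames:
--             memory.append(page)
--             fifo_queue.append(page)
--             last_used[page] = t
--             continue
--         if algorithm == "FIFO":
--             victim = fifo_queue.pop(0)
--         elif algorithm == "LRU":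
--             victim = min(memory, key=lambda p: last_used.get(p, -1))
--         else:
--             future = seq[t + 1 :]
--             victim = max(
--                 memory,
--                 key=lambda p: future.index(p) if p in future else 10**9,
--             )
--         memory[memory.index(victim)] = page
--         if algorithm == "FIFO":
--             fifo_queue.append(page)
--         last_used[page] = t
--     return faults
-- ===== SOURCE B (Python) =====
-- def page_faults(seq: list[int], frames: int, algorithm: str) -> int:
--     if algorithm == "FIFO":
--         return _fifo(seq, frames)
--     if algorithm == "LRU":
--         return _lru(seq, frames)
--     return _opt(seq, frames)
--
--
-- def _fifo(seq, frames):
--     # FIFO needs only the queue: its contents always coincide with the frame contents.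
--     q = []
--     faults = 0
--     for page in seq:
--         if page not in q:
--             faults += 1
--             if len(q) >= frames:
--                 q.pop(0)
--             q.append(page)
--     return faults
--
--
-- def _lru(seq, frames):
--     # Recency list, least-recently-used first: a hit moves the page to the back,
--     # eviction pops the front.  No timestamp dict needed.
--     r = []
--     faults = 0
--     for page in seq:
--         if page in r:
--             r.remove(page)
--         else:
--             faults += 1
--             if len(r) >= frames:
--                 r.pop(0)
--         r.append(page)
--     return faults
--
--
-- def _opt(seq, frames):
--     # Precompute next-occurrence positions in one backward pass, then keep each
--     # resident page paired with its next use: victim selection has an O(1) key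
--     # (A re-slices the future and scans it per frame on every fault).
--     n = len(seq)
--     nxt = [None] * n
--     seen = {}
--     for i in range(n - 1, -1, -1):
--         nxt[i] = seen.get(seq[i])
--         seen[seq[i]] = i
--     mem = []  # (page, absolute index of its next use, or None)
--     faults = 0
--     INF = 10**9
--     for t, page in enumerate(seq):
--         i = next((j for j, e in enumerate(mem) if e[0] == page), None)
--         if i is not None:
--             mem[i] = (page, nxt[t])
--             continue
--         faults += 1
--         if len(mem) < frames:
--             mem.append((page, nxt[t]))
--         else:
--             victim = max(mem, key=lambda e: INF if e[1] is None else e[1] - t - 1)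
--             mem[mem.index(victim)] = (page, nxt[t])
--     return faults
-- ===== Notes on version B (the rewrite author's own statement) =====
-- stated objective: faster
-- what changed: B dispatches to three dedicated simulations: FIFO keeps only the queue (contents = frames), LRU keeps a recency-ordered list (evict head, move hit to back) instead of a timestamp dict with min-scans, and OPT precomputes a next-occurrence table in one backward pass and stores each resident page paired with its next use, so the victim key is O(1) instead of A's per-fault future slice plus list.index scan per frame.
import Mathlib
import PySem

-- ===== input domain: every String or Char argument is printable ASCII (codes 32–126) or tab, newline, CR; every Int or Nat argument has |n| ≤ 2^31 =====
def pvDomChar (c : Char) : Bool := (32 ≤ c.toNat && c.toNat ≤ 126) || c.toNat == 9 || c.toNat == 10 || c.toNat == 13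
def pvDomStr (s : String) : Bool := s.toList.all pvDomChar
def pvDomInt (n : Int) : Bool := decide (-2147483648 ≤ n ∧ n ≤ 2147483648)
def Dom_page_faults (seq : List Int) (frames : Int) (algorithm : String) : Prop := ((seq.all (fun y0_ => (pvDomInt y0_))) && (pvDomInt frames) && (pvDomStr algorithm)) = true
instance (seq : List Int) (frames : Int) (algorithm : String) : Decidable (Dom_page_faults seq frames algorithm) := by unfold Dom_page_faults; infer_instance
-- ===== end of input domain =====

-- B dispatches to three dedicated simulations (FIFO: queue only; LRU: recency-ordered list;
-- OPT: next-occurrence table precomputed backwards, residents paired with their next use),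
-- replacing A's single loop with its timestamp dict and per-fault future slice + index scans
-- (objective: faster on the OPT path).

-- ===== PORT A =====
-- the 'for t, page in enumerate(seq)' loop of A, as structural recursion on the remaining suffix;
-- state = (t, memory, fifo_queue, last_used, faults)
def loopA (seq : List Int) (frames : Int) (algorithm : String) :
    List Int → Int → List Int → List Int → PySem.Dict Int Int → Int → Int
  | [], _, _, _, _, faults => faults
  | page :: rest, t, memory, fifo, lu, faults =>
    if page ∈ memory then
      loopA seq frames algorithm rest (t + 1) memory fifo (lu.insert page t) faults
    else if (memory.length : Int) < frames then
      loopA seq frames algorithm rest (t + 1) (memory ++ [page]) (fifo ++ [page])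
        (lu.insert page t) (faults + 1)
    else
      -- victim selection; 'none' = the Python raised (IndexError/ValueError), outside Pre_
      let vf : Option Int × List Int :=
        if algorithm = "FIFO" then
          match PySem.List.pop? fifo 0 with
          | some (v, q) => (some v, q)
          | none => (none, fifo)
        else if algorithm = "LRU" then
          (PySem.List.min? memory (fun p => lu.getD p (-1)), fifo)
        else
          let future := PySem.List.slice seq (some (t + 1)) none
          (PySem.List.max? memory (fun p =>
              match PySem.List.index? future p with
              | some i => (i : Int)
              | none => 10 ^ 9), fifo)
      match vf with
      | (none, _) => faults + 1
      | (some victim, fifo1) =>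
        let memory1 :=
          match PySem.List.index? memory victim with
          | some i => memory.set i page
          | none => memory            -- memory.index raises; unreachable under Pre_
        let fifo2 := if algorithm = "FIFO" then fifo1 ++ [page] else fifo1
        loopA seq frames algorithm rest (t + 1) memory1 fifo2 (lu.insert page t) (faults + 1)

def page_faults (seq : List Int) (frames : Int) (algorithm : String) : Int :=
  loopA seq frames algorithm seq 0 [] [] PySem.Dict.empty 0

-- ===== PORT B =====
-- B's _fifo: only the queue is kept (its contents are the frame contents)
def fifoLoop (frames : Int) : List Int → List Int → Int → Int
  | [], _, faults => faults
  | page :: rest, q, faults =>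
    if page ∈ q then fifoLoop frames rest q faults
    else if frames ≤ (q.length : Int) then
      match PySem.List.pop? q 0 with
      | none => faults + 1                            -- q.pop(0) IndexError, outside Pre_
      | some (_, q') => fifoLoop frames rest (q' ++ [page]) (faults + 1)
    else fifoLoop frames rest (q ++ [page]) (faults + 1)

-- B's _lru: recency list, least-recently-used first; a hit moves the page to the back
-- ('r.remove(page)' with page ∈ r is r.erase page: PySem.List.remove?_eq_some_erase)
def lruLoop (frames : Int) : List Int → List Int → Int → Int
  | [], _, faults => faults
  | page :: rest, r, faults =>
    if page ∈ r then lruLoop frames rest (r.erase page ++ [page]) faults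
    else if frames ≤ (r.length : Int) then
      match PySem.List.pop? r 0 with
      | none => faults + 1                            -- r.pop(0) IndexError, outside Pre_
      | some (_, r') => lruLoop frames rest (r' ++ [page]) (faults + 1)
    else lruLoop frames rest (r ++ [page]) (faults + 1)

-- B's backward pass 'for i in range(n-1,-1,-1): nxt[i] = seen.get(seq[i]); seen[seq[i]] = i':
-- suffix-first structural recursion building (seen, nxt); i is the absolute index of the head
def buildNxt : List Int → Int → PySem.Dict Int Int × List (Option Int)
  | [], _ => (PySem.Dict.empty, [])
  | p :: rest, i =>
    let sa := buildNxt rest (i + 1)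
    (sa.1.insert p i, sa.1.get? p :: sa.2)

-- B's _opt loop: mem pairs each resident page with the absolute index of its next use
-- ('next((j for j, e in enumerate(mem) if e[0] == page), None)' is index? on the fst column)
def optLoop (frames : Int) : List Int → List (Option Int) → Int → List (Int × Option Int) → Int → Int
  | [], _, _, _, faults => faults
  | _ :: _, [], _, _, faults => faults                -- unreachable: nxt has seq's length
  | page :: rest, nx :: nrest, t, mem, faults =>
    match PySem.List.index? (mem.map Prod.fst) page with
    | some i => optLoop frames rest nrest (t + 1) (mem.set i (page, nx)) faults
    | none =>
      if (mem.length : Int) < frames then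
        optLoop frames rest nrest (t + 1) (mem ++ [(page, nx)]) (faults + 1)
      else
        match PySem.List.max? mem (fun e => match e.2 with
            | some j => j - t - 1
            | none => 10 ^ 9) with
        | none => faults + 1                          -- max(mem) ValueError, outside Pre_
        | some v =>
          match PySem.List.index? mem v with
          | some i => optLoop frames rest nrest (t + 1) (mem.set i (page, nx)) (faults + 1)
          | none => faults + 1                        -- mem.index raises; unreachable (v ∈ mem)

def page_faults_alt (seq : List Int) (frames : Int) (algorithm : String) : Int :=
  if algorithm = "FIFO" then fifoLoop frames seq [] 0
  else if algorithm = "LRU" then lruLoop frames seq [] 0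
  else optLoop frames seq (buildNxt seq 0).2 0 [] 0

-- ===== PRECONDITION & SPEC =====
-- Pre_ excludes exactly the inputs on which the Python A raises: with frames < 1 and a nonempty
-- seq the first miss evicts from an empty memory (IndexError / ValueError on min/max of []).
def Pre_page_faults (seq : List Int) (frames : Int) (algorithm : String) : Prop :=
  seq = [] ∨ 1 ≤ frames
instance (seq : List Int) (frames : Int) (algorithm : String) :
    Decidable (Pre_page_faults seq frames algorithm) := by unfold Pre_page_faults; infer_instance

def pvWitness_page_faults : List Int × Int × String := ([7, 3, 7, 2, 3, 7], 2, "OPT")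

def Spec_page_faults (seq : List Int) (frames : Int) (algorithm : String) (out : Int) : Prop :=
  out = page_faults_alt seq frames algorithm
instance (seq : List Int) (frames : Int) (algorithm : String) (out : Int) :
    Decidable (Spec_page_faults seq frames algorithm out) := by unfold Spec_page_faults; infer_instance

-- ===== CLAIM (what is proved, stated in full; the proofs are below) =====
def Claim_equal_page_faults : Prop := ∀ (seq : List Int) (frames : Int) (algorithm : String), Dom_page_faults seq frames algorithm → Pre_page_faults seq frames algorithm → Spec_page_faults seq frames algorithm (page_faults seq frames algorithm)

-- ===== LEMMAS AND PROOFS =====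

-- replacing the first occurrence of v by x is, up to permutation, erasing v and consing x
theorem set_index_perm {α : Type} [BEq α] [LawfulBEq α] :
    ∀ (l : List α) (i : Nat) (v x : α), PySem.List.index? l v = some i →
      (l.set i x).Perm (x :: l.erase v) := by
  intro l
  induction l with
  | nil =>
    intro i v x h
    have : v ∈ ([] : List α) :=
      (PySem.List.index?_isSome_iff _ _).mp (by rw [h]; rfl)
    cases this
  | cons a l ih =>
    intro i v x h
    by_cases ha : a = v
    · subst ha
      rw [PySem.List.index?_cons_self] at h
      injection h with h; subst h
      simp only [List.set_cons_zero, List.erase_cons_head]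
      exact List.Perm.refl _
    · rw [PySem.List.index?_cons_of_ne _ ha] at h
      cases hj : PySem.List.index? l v with
      | none => rw [hj] at h; simp at h
      | some j =>
        rw [hj] at h
        simp only [Option.map_some] at h
        injection h with h; subst h
        have herase : (a :: l).erase v = a :: l.erase v := by
          simp [ha]
        rw [herase, List.set_cons_succ]
        exact ((ih j v x hj).cons a).trans (List.Perm.swap x a _)

-- writing back the value found at its own index is a no-op
theorem set_index_self {α : Type} [BEq α] [LawfulBEq α] :
    ∀ (l : List α) (i : Nat) (v : α), PySem.List.index? l v = some i → l.set i v = l := by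
  intro l
  induction l with
  | nil => intro i v _; rfl
  | cons a l ih =>
    intro i v h
    by_cases ha : a = v
    · subst ha
      rw [PySem.List.index?_cons_self] at h
      injection h with h; subst h
      rfl
    · rw [PySem.List.index?_cons_of_ne _ ha] at h
      cases hj : PySem.List.index? l v with
      | none => rw [hj] at h; simp at h
      | some j =>
        rw [hj] at h
        simp only [Option.map_some] at h
        injection h with h; subst h
        rw [List.set_cons_succ, ih j v hj]

-- replacing one slot by a fresh page keeps the frame contents duplicate-free
theorem nodup_set_fresh : ∀ (l : List Int) (i : Nat) (x : Int),
    l.Nodup → x ∉ l → (l.set i x).Nodup := by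
  intro l
  induction l with
  | nil => intro i x _ _; simp
  | cons a l ih =>
    intro i x hnd hx
    cases i with
    | zero =>
      simp only [List.set]
      refine List.nodup_cons.mpr ⟨fun hm => hx (List.mem_cons_of_mem _ hm), (List.nodup_cons.mp hnd).2⟩
    | succ n =>
      simp only [List.set]
      refine List.nodup_cons.mpr ⟨?_, ih n x (List.nodup_cons.mp hnd).2 (fun hm => hx (List.mem_cons_of_mem _ hm))⟩
      intro hm
      rcases List.mem_or_eq_of_mem_set hm with hm | rfl
      · exact (List.nodup_cons.mp hnd).1 hm
      · exact hx (List.mem_cons_self)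

-- an element of mem.set i x, where i is the slot of the (unique) entry with fst = v,
-- is either the new entry or an old entry whose fst is not v
theorem mem_set_fst :
    ∀ (l : List (Int × Option Int)) (i : Nat) (x e : Int × Option Int) (v : Int),
      PySem.List.index? (l.map Prod.fst) v = some i → (l.map Prod.fst).Nodup →
      e ∈ l.set i x → e = x ∨ (e ∈ l ∧ e.1 ≠ v) := by
  intro l
  induction l with
  | nil => intro i x e v _ _ he; cases he
  | cons a l ih =>
    intro i x e v h hnd he
    simp only [List.map_cons] at h hnd
    by_cases ha : a.1 = v
    · rw [ha, PySem.List.index?_cons_self] at h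
      injection h with h; subst h
      rw [List.set_cons_zero] at he
      rcases List.mem_cons.mp he with rfl | he
      · exact Or.inl rfl
      · refine Or.inr ⟨List.mem_cons_of_mem _ he, ?_⟩
        intro hev
        exact (List.nodup_cons.mp hnd).1 (ha ▸ hev ▸ List.mem_map_of_mem he)
    · rw [PySem.List.index?_cons_of_ne _ ha] at h
      cases hj : PySem.List.index? (l.map Prod.fst) v with
      | none => rw [hj] at h; simp at h
      | some j =>
        rw [hj] at h
        simp only [Option.map_some] at h
        injection h with h; subst h
        rw [List.set_cons_succ] at he
        rcases List.mem_cons.mp he with rfl | he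
        · exact Or.inr ⟨List.mem_cons_self, ha⟩
        · rcases ih j x e v hj (List.nodup_cons.mp hnd).2 he with h1 | ⟨h1, h2⟩
          · exact Or.inl h1
          · exact Or.inr ⟨List.mem_cons_of_mem _ h1, h2⟩

-- min(xs, key) is the unique strict minimizer (fold form of PySem.List.min?)
theorem foldl_min_unique {α : Type} (f : α → Int) (m : α) :
    ∀ (l : List α) (acc : Option α),
      (m ∈ l ∨ acc = some m) →
      (∀ x ∈ l, x ≠ m → f m < f x) →
      (∀ c, acc = some c → c = m ∨ f m < f c) →
      List.foldl (fun acc x => match acc with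
        | none => some x
        | some c => if f x < f c then some x else some c) acc l = some m := by
  intro l
  induction l with
  | nil =>
    intro acc hmem _ _
    rcases hmem with hm | hm
    · cases hm
    · exact hm
  | cons x l ih =>
    intro acc hmem hlt hacc
    simp only [List.foldl_cons]
    have hlt' : ∀ y ∈ l, y ≠ m → f m < f y := fun y hy => hlt y (List.mem_cons_of_mem _ hy)
    have hxm : x = m ∨ f m < f x := by
      by_cases hx : x = m
      · exact Or.inl hx
      · exact Or.inr (hlt x List.mem_cons_self hx)
    cases acc with
    | none =>
      refine ih (some x) ?_ hlt' ?_
      · rcases hmem with hm | hm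
        · rcases List.mem_cons.mp hm with rfl | hm
          · exact Or.inr rfl
          · exact Or.inl hm
        · cases hm
      · intro c hc; injection hc with hc; subst hc; exact hxm
    | some c =>
      show List.foldl _ (if f x < f c then some x else some c) l = some m
      rcases hacc c rfl with hcm | hflt
      · have hcond : ¬ f x < f c := by
          rw [hcm]
          rcases hxm with hx | h
          · rw [hx]; exact lt_irrefl _
          · exact fun h' => absurd (h.trans h') (lt_irrefl _)
        rw [if_neg hcond]
        exact ih (some c) (Or.inr (by rw [hcm])) hlt'
          (fun c' hc' => Or.inl (by injection hc' with hc'; rw [← hc']; exact hcm))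
      · have hm_in : m ∈ x :: l := by
          rcases hmem with hm | hm
          · exact hm
          · injection hm with hm; subst hm; exact absurd hflt (lt_irrefl _)
        by_cases hcond : f x < f c
        · rw [if_pos hcond]
          refine ih (some x) ?_ hlt' ?_
          · rcases List.mem_cons.mp hm_in with rfl | hm
            · exact Or.inr rfl
            · exact Or.inl hm
          · intro c' hc'; injection hc' with hc'; subst hc'; exact hxm
        · rw [if_neg hcond]
          refine ih (some c) ?_ hlt' (fun c' hc' => by injection hc' with hc'; subst hc'; exact Or.inr hflt)
          rcases List.mem_cons.mp hm_in with rfl | hm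
          · exact absurd hflt hcond
          · exact Or.inl hm

theorem min?_unique {α : Type} (f : α → Int) (l : List α) (m : α)
    (hm : m ∈ l) (hlt : ∀ x ∈ l, x ≠ m → f m < f x) :
    PySem.List.min? l f = some m := by
  unfold PySem.List.min?
  exact foldl_min_unique f m l none (Or.inl hm) hlt (fun c hc => by cases hc)

-- max over the fst column equals the fst of max over the pairs when the keys agree
theorem foldl_max_fst {α β κ : Type} [LT κ] [DecidableLT κ] (F : α → β) (f : β → κ) (g : α → κ) :
    ∀ (l : List α) (acc : Option α),
      (∀ e ∈ l, f (F e) = g e) →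
      (∀ c, acc = some c → f (F c) = g c) →
      List.foldl (fun acc x => match acc with
        | none => some x
        | some c => if f c < f x then some x else some c) (acc.map F) (l.map F)
      = (List.foldl (fun acc x => match acc with
        | none => some x
        | some c => if g c < g x then some x else some c) acc l).map F := by
  intro l
  induction l with
  | nil => intro acc _ _; rfl
  | cons e l ih =>
    intro acc hK hacc
    simp only [List.map_cons, List.foldl_cons]
    have h2 : f (F e) = g e := hK e List.mem_cons_self
    have hK' : ∀ y ∈ l, f (F y) = g y := fun y hy => hK y (List.mem_cons_of_mem _ hy)
    cases acc with
    | none =>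
      exact ih (some e) hK' (fun c hc => by injection hc with hc; subst hc; exact h2)
    | some c =>
      have h1 : f (F c) = g c := hacc c rfl
      show List.foldl _ (if f (F c) < f (F e) then some (F e) else some (F c)) (List.map F l)
        = (List.foldl _ (if g c < g e then some e else some c) l).map F
      rw [h1, h2]
      by_cases hlt : g c < g e
      · rw [if_pos hlt, if_pos hlt]
        exact ih (some e) hK' (fun c' hc' => by injection hc' with hc'; subst hc'; exact h2)
      · rw [if_neg hlt, if_neg hlt]
        exact ih (some c) hK' (fun c' hc' => by injection hc' with hc'; subst hc'; exact h1)

theorem max?_map_fst (l : List (Int × Option Int)) (f : Int → Int) (g : Int × Option Int → Int)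
    (h : ∀ e ∈ l, f e.1 = g e) :
    PySem.List.max? (l.map Prod.fst) f = (PySem.List.max? l g).map Prod.fst := by
  unfold PySem.List.max?
  exact foldl_max_fst Prod.fst f g l none h (fun c hc => by cases hc)

-- with duplicate-free fst column, the index of a pair equals the index of its fst
theorem index?_map_fst :
    ∀ (l : List (Int × Option Int)) (v : Int × Option Int),
      (l.map Prod.fst).Nodup → v ∈ l →
      PySem.List.index? (l.map Prod.fst) v.1 = PySem.List.index? l v := by
  intro l
  induction l with
  | nil => intro v _ hv; cases hv
  | cons a l ih =>
    intro v hnd hv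
    simp only [List.map_cons] at hnd ⊢
    by_cases hav : a = v
    · subst hav
      rw [PySem.List.index?_cons_self, PySem.List.index?_cons_self]
    · have hvl : v ∈ l := by
        rcases List.mem_cons.mp hv with rfl | h
        · exact absurd rfl hav
        · exact h
      by_cases hf : a.1 = v.1
      · exact absurd (hf ▸ List.mem_map_of_mem hvl) (List.nodup_cons.mp hnd).1
      · rw [PySem.List.index?_cons_of_ne _ hf, PySem.List.index?_cons_of_ne _ hav,
          ih v (List.nodup_cons.mp hnd).2 hvl]

-- shifting the next-occurrence index past a head that is not p
theorem index?_shift {page p : Int} (h : page ≠ p) (rest : List Int) (t : Int) :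
    (PySem.List.index? (page :: rest) p).map (fun m : Nat => t + (m : Int))
      = (PySem.List.index? rest p).map (fun m : Nat => t + 1 + (m : Int)) := by
  rw [PySem.List.index?_cons_of_ne _ h]
  cases PySem.List.index? rest p <;> simp <;> ring

-- the backward-pass 'seen' dict holds the first occurrence of each page in the processed suffix
theorem buildNxt_fst_get? : ∀ (l : List Int) (i : Int) (p : Int),
    ((buildNxt l i).1).get? p = (PySem.List.index? l p).map (fun m : Nat => i + (m : Int)) := by
  intro l
  induction l with
  | nil => intro i p; simp [buildNxt, PySem.Dict.get?_empty]
  | cons a l ih =>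
    intro i p
    simp only [buildNxt]
    rw [PySem.Dict.get?_insert]
    by_cases hpa : p = a
    · subst hpa
      rw [PySem.List.index?_cons_self]
      simp
    · rw [if_neg hpa, PySem.List.index?_cons_of_ne _ (fun h => hpa h.symm), ih]
      cases PySem.List.index? l p <;> simp <;> ring

-- the relation 'nrest is the next-occurrence list of rest, with absolute positions starting at t'
def NxtRel : List Int → List (Option Int) → Int → Prop
  | [], [], _ => True
  | page :: rest, nx :: nrest, t =>
      nx = (PySem.List.index? rest page).map (fun m : Nat => t + 1 + (m : Int)) ∧ NxtRel rest nrest (t + 1)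
  | _, _, _ => False

theorem buildNxt_rel : ∀ (l : List Int) (i : Int), NxtRel l (buildNxt l i).2 i := by
  intro l
  induction l with
  | nil => intro i; simp [buildNxt, NxtRel]
  | cons a l ih =>
    intro i
    simp only [buildNxt, NxtRel]
    exact ⟨by rw [buildNxt_fst_get?], ih (i + 1)⟩

-- FIFO simulation: A's memory is a permutation of B's queue, and only membership,
-- length and the popped head matter for the fault count
theorem fifo_eq (seq : List Int) (frames : Int) :
    ∀ (rest : List Int) (t : Int) (memory q : List Int)
      (lu : PySem.Dict Int Int) (faults : Int),
      memory.Perm q →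
      loopA seq frames "FIFO" rest t memory q lu faults = fifoLoop frames rest q faults := by
  intro rest
  induction rest with
  | nil => intro t memory q lu faults _; rfl
  | cons page rest ih =>
    intro t memory q lu faults hperm
    simp only [loopA, fifoLoop]
    by_cases hin : page ∈ memory
    · rw [if_pos hin, if_pos (hperm.mem_iff.mp hin)]
      exact ih (t + 1) memory q _ faults hperm
    · rw [if_neg hin, if_neg (fun h => hin (hperm.mem_iff.mpr h))]
      by_cases hsz : (memory.length : Int) < frames
      · rw [if_pos hsz, if_neg (by rw [← hperm.length_eq]; omega)]
        exact ih (t + 1) (memory ++ [page]) (q ++ [page]) _ (faults + 1)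
          (hperm.append_right [page])
      · rw [if_neg hsz, if_pos (show frames ≤ (q.length : Int) by rw [← hperm.length_eq]; omega)]
        cases q with
        | nil =>
          have hm : memory = [] := hperm.eq_nil
          subst hm
          rfl
        | cons v q' =>
          have hv : v ∈ memory := hperm.mem_iff.mpr List.mem_cons_self
          obtain ⟨i, hi⟩ := Option.isSome_iff_exists.mp
            ((PySem.List.index?_isSome_iff memory v).mpr hv)
          rw [PySem.List.pop?_zero_cons]
          simp only [if_true, hi]
          refine ih (t + 1) (memory.set i page) (q' ++ [page]) _ (faults + 1) ?_
          refine (set_index_perm memory i v page hi).trans ?_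
          refine ((hperm.erase v).trans (by rw [List.erase_cons_head])).cons page |>.trans ?_
          exact (List.perm_append_singleton page q').symm
      
-- LRU simulation: B's recency list is a permutation of A's memory, strictly increasing
-- in last-used time, so its head is A's unique min-timestamp victim
theorem lru_eq (seq : List Int) (frames : Int) :
    ∀ (rest : List Int) (t : Int) (memory r fifo : List Int)
      (lu : PySem.Dict Int Int) (faults : Int),
      memory.Perm r →
      List.Pairwise (fun a b => lu.getD a (-1) < lu.getD b (-1)) r →
      (∀ p ∈ r, lu.getD p (-1) < t) →
      loopA seq frames "LRU" rest t memory fifo lu faults = lruLoop frames rest r faults := by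
  intro rest
  induction rest with
  | nil => intro t memory r fifo lu faults _ _ _; rfl
  | cons page rest ih =>
    intro t memory r fifo lu faults hperm hpw hbnd
    have hndr : r.Nodup :=
      hpw.imp (fun hab => fun he => absurd (he ▸ hab) (lt_irrefl _))
    simp only [loopA, lruLoop]
    have hbnd' : ∀ (s : List Int),
        List.Pairwise (fun a b => lu.getD a (-1) < lu.getD b (-1)) s →
        (∀ p ∈ s, p ∈ r) → (∀ p ∈ s, p ≠ page) →
        List.Pairwise (fun a b => (lu.insert page t).getD a (-1) < (lu.insert page t).getD b (-1)) (s ++ [page])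
          ∧ (∀ p ∈ s ++ [page], (lu.insert page t).getD p (-1) < t + 1) := by
      intro s hps hsub hne
      constructor
      · rw [List.pairwise_append]
        refine ⟨?_, List.pairwise_singleton _ _, ?_⟩
        · refine hps.imp_of_mem (fun {a b} haa hbb hab => ?_)
          rw [PySem.Dict.getD_insert_of_ne _ _ _ (hne a haa),
            PySem.Dict.getD_insert_of_ne _ _ _ (hne b hbb)]
          exact hab
        · intro a ha b hb
          rcases List.mem_singleton.mp hb with rfl
          rw [PySem.Dict.getD_insert_of_ne _ _ _ (hne a ha), PySem.Dict.getD_insert_self]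
          exact hbnd a (hsub a ha)
      · intro p hp
        rcases List.mem_append.mp hp with hp | hp
        · rw [PySem.Dict.getD_insert_of_ne _ _ _ (hne p hp)]
          exact (hbnd p (hsub p hp)).trans (by omega)
        · rcases List.mem_singleton.mp hp with rfl
          rw [PySem.Dict.getD_insert_self]; omega
    by_cases hin : page ∈ memory
    · have hinr : page ∈ r := hperm.mem_iff.mp hin
      rw [if_pos hin, if_pos hinr]
      have hsub : ∀ p ∈ r.erase page, p ∈ r := fun p hp => (hndr.mem_erase_iff.mp hp).2
      have hne : ∀ p ∈ r.erase page, p ≠ page := fun p hp => (hndr.mem_erase_iff.mp hp).1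
      obtain ⟨hpw', hbnd2⟩ := hbnd' (r.erase page)
        (List.Pairwise.sublist (List.erase_sublist) hpw) hsub hne
      refine ih (t + 1) memory (r.erase page ++ [page]) fifo _ faults ?_ hpw' hbnd2
      exact (hperm.trans (List.perm_cons_erase hinr)).trans
        (List.perm_append_singleton page (r.erase page)).symm
    · rw [if_neg hin, if_neg (fun h => hin (hperm.mem_iff.mpr h))]
      by_cases hsz : (memory.length : Int) < frames
      · rw [if_pos hsz, if_neg (by rw [← hperm.length_eq]; omega)]
        have hne : ∀ p ∈ r, p ≠ page := fun p hp he => hin (hperm.mem_iff.mpr (he ▸ hp))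
        obtain ⟨hpw', hbnd2⟩ := hbnd' r hpw (fun p hp => hp) hne
        exact ih (t + 1) (memory ++ [page]) (r ++ [page]) _ _ (faults + 1)
          (hperm.append_right [page]) hpw' hbnd2
      · have hLF : (("LRU" : String) = "FIFO") = False := by simp
        rw [if_neg hsz, if_pos (show frames ≤ (r.length : Int) by rw [← hperm.length_eq]; omega)]
        cases r with
        | nil =>
          have hm : memory = [] := hperm.eq_nil
          subst hm
          simp only [hLF, if_false, if_true]
          rfl
        | cons v r1 =>
          have hv : v ∈ memory := hperm.mem_iff.mpr List.mem_cons_self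
          have hmin : PySem.List.min? memory (fun p => lu.getD p (-1)) = some v := by
            refine min?_unique _ memory v hv (fun x hx hxv => ?_)
            rcases List.mem_cons.mp (hperm.mem_iff.mp hx) with rfl | hx1
            · exact absurd rfl hxv
            · exact (List.pairwise_cons.mp hpw).1 x hx1
          obtain ⟨i, hi⟩ := Option.isSome_iff_exists.mp
            ((PySem.List.index?_isSome_iff memory v).mpr hv)
          rw [PySem.List.pop?_zero_cons]
          simp only [hLF, if_false, if_true, hmin, hi]
          have hne : ∀ p ∈ r1, p ≠ page :=
            fun p hp he => hin (hperm.mem_iff.mpr (List.mem_cons_of_mem _ (he ▸ hp)))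
          have hsub : ∀ p ∈ r1, p ∈ v :: r1 := fun p hp => List.mem_cons_of_mem _ hp
          obtain ⟨hpw', hbnd2⟩ := hbnd' r1 (List.Pairwise.sublist
            (List.sublist_cons_self v r1) hpw) hsub hne
          refine ih (t + 1) (memory.set i page) (r1 ++ [page]) _ _ (faults + 1) ?_ hpw' hbnd2
          refine (set_index_perm memory i v page hi).trans ?_
          refine ((hperm.erase v).trans (by rw [List.erase_cons_head])).cons page |>.trans ?_
          exact (List.perm_append_singleton page r1).symm

-- OPT simulation: B's mem has exactly A's memory in its fst column and each resident's
-- stored next use gives A's future.index key up to the strictly monotone shift j ↦ j - t - 1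
theorem opt_eq (seq : List Int) (frames : Int) (algorithm : String)
    (hF : ¬ algorithm = "FIFO") (hL : ¬ algorithm = "LRU") :
    ∀ (rest : List Int) (nrest : List (Option Int)) (t : Int) (memory : List Int)
      (mem : List (Int × Option Int)) (fifo : List Int) (lu : PySem.Dict Int Int) (faults : Int),
      0 ≤ t → seq.drop t.toNat = rest → NxtRel rest nrest t →
      mem.map Prod.fst = memory → memory.Nodup →
      (∀ e ∈ mem, e.2 = (PySem.List.index? rest e.1).map (fun m : Nat => t + (m : Int))) →
      loopA seq frames algorithm rest t memory fifo lu faults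
        = optLoop frames rest nrest t mem faults := by
  intro rest
  induction rest with
  | nil =>
    intro nrest t memory mem fifo lu faults _ _ hrel _ _ _
    cases nrest with
    | nil => rfl
    | cons nx nrest => exact absurd hrel (by simp [NxtRel])
  | cons page rest ih =>
    intro nrest t memory mem fifo lu faults ht hdrop hrel hmap hnd hent
    cases nrest with
    | nil => exact absurd hrel (by simp [NxtRel])
    | cons nx nrest =>
      obtain ⟨hnx, hrel'⟩ := hrel
      have ht' : (0:Int) ≤ t + 1 := by omega
      have hdrop' : seq.drop (t + 1).toNat = rest := by
        have h1 : (t + 1).toNat = t.toNat + 1 := by omega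
        rw [h1, ← List.tail_drop, hdrop]
        rfl
      simp only [loopA, optLoop, hmap]
      by_cases hin : page ∈ memory
      · obtain ⟨i, hi⟩ := Option.isSome_iff_exists.mp
          ((PySem.List.index?_isSome_iff memory page).mpr hin)
        rw [if_pos hin, hi]
        refine ih nrest (t + 1) memory (mem.set i (page, nx)) fifo _ faults
          ht' hdrop' hrel' ?_ hnd ?_
        · rw [List.map_set, hmap, set_index_self memory i page hi]
        · intro e he
          rcases mem_set_fst mem i (page, nx) e page (by rw [hmap]; exact hi)
              (by rw [hmap]; exact hnd) he with rfl | ⟨hmem, hne⟩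
          · exact hnx
          · rw [hent e hmem, index?_shift (fun h => hne h.symm)]
      · rw [if_neg hin,
          (PySem.List.index?_eq_none_iff memory page).mpr hin]
        have hlen : mem.length = memory.length := by rw [← hmap, List.length_map]
        have hshift : ∀ e ∈ mem, e.2 = (PySem.List.index? rest e.1).map (fun m : Nat => t + 1 + (m : Int)) := by
          intro e he
          have hne : page ≠ e.1 := fun h =>
            hin (h ▸ (hmap ▸ List.mem_map_of_mem he))
          rw [hent e he, index?_shift hne]
        by_cases hsz : (memory.length : Int) < frames
        · rw [if_pos hsz, if_pos (by rw [hlen]; exact hsz)]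
          refine ih nrest (t + 1) (memory ++ [page]) (mem ++ [(page, nx)]) _ _ (faults + 1)
            ht' hdrop' hrel' (by rw [List.map_append, hmap]; rfl) ?_ ?_
          · rw [List.nodup_append]
            exact ⟨hnd, List.nodup_singleton page,
              fun a ha b hb => by simp at hb; subst hb; exact fun h => hin (h ▸ ha)⟩
          · intro e he
            rcases List.mem_append.mp he with he | he
            · exact hshift e he
            · rcases List.mem_singleton.mp he with rfl
              exact hnx
        · rw [if_neg hsz, if_neg (show ¬ (mem.length : Int) < frames by rw [hlen]; exact hsz)]
          rw [if_neg hF, if_neg hL]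
          have hslice : PySem.List.slice seq (some (t + 1)) none = rest := by
            rw [PySem.List.slice_from seq ht']; exact hdrop'
          have hmax : PySem.List.max? memory (fun p =>
                match PySem.List.index? (PySem.List.slice seq (some (t + 1)) none) p with
                | some i => (i : Int)
                | none => 10 ^ 9)
              = (PySem.List.max? mem (fun e => match e.2 with
                | some j => j - t - 1
                | none => 10 ^ 9)).map Prod.fst := by
            rw [← hmap]
            refine max?_map_fst mem _ _ (fun e he => ?_)
            rw [hslice]
            rw [hshift e he]
            cases PySem.List.index? rest e.1 with
            | none => rfl
            | some m => simp only [Option.map_some]; ring_nf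
          rw [hmax]
          cases hvmax : PySem.List.max? mem (fun e => match e.2 with
              | some j => j - t - 1
              | none => 10 ^ 9) with
          | none => rfl
          | some v =>
            simp only [Option.map_some]
            have hvm : v ∈ mem := PySem.List.max?_mem hvmax
            have hidx : PySem.List.index? memory v.1 = PySem.List.index? mem v := by
              rw [← hmap]
              exact index?_map_fst mem v (hmap ▸ hnd) hvm
            cases hj : PySem.List.index? mem v with
            | none =>
              rw [hidx, hj]
              exfalso
              exact (PySem.List.index?_eq_none_iff mem v).mp hj hvm
            | some i =>
              rw [hidx, hj]
              rw [if_neg hF]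
              refine ih nrest (t + 1) (memory.set i page) (mem.set i (page, nx)) fifo _ (faults + 1)
                ht' hdrop' hrel' (by rw [List.map_set, hmap]) ?_ ?_
              · exact nodup_set_fresh memory i page hnd hin
              · intro e he
                rcases List.mem_or_eq_of_mem_set he with he | rfl
                · exact hshift e he
                · exact hnx

-- ===== VERDICT (by name: the statement is the Claim_ definition above) =====
theorem page_faults_spec : Claim_equal_page_faults := by
  intro seq frames algorithm _ _
  unfold Spec_page_faults page_faults page_faults_alt
  by_cases hF : algorithm = "FIFO"
  · subst hF
    rw [if_pos rfl]
    exact fifo_eq seq frames seq 0 [] [] PySem.Dict.empty 0 (List.Perm.refl _)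
  · rw [if_neg hF]
    by_cases hL : algorithm = "LRU"
    · subst hL
      rw [if_pos rfl]
      exact lru_eq seq frames seq 0 [] [] [] PySem.Dict.empty 0 (List.Perm.refl _)
        List.Pairwise.nil (fun p hp => by cases hp)
    · rw [if_neg hL]
      exact opt_eq seq frames algorithm hF hL seq (buildNxt seq 0).2 0 [] [] [] PySem.Dict.empty 0
        le_rfl (by simp) (buildNxt_rel seq 0) rfl List.nodup_nil (fun e he => by cases he)
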